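-- pv_equiv track=rewrite | github.com/LSTS/dune | programs/scripts/dune-create-changelog.py | sort_keys
-- ===== SOURCE A (Python) =====
-- def sort_keys(k):
--     p = []
--     t = []
--     b = []
--     for e in k:
--         if e.startswith('Programs') or e.startswith('Config'):
--             p.append(e)
--         elif e.startswith('DUNE'):
--             t.append(e)
--         else:
--             b.append(e)
--     p.sort()
--     t.sort()
--     b.sort()
--     return p + t + b
-- ===== SOURCE B (Python) =====
-- def sort_keys(k):
--     def rank(e):
--         if e.startswith('Programs') or e.startswith('Config'):
--             return 0
--         if e.startswith('DUNE'):
--             return 1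
--         return 2
--     return sorted(k, key=lambda e: (rank(e), e))
-- ===== Notes on version B (the rewrite author's own statement) =====
-- stated objective: idiomatic
-- what changed: Replaces the partition-into-three-lists-sort-each-and-concatenate with a single stable keyed sort using a (rank, value) tuple key.
import Mathlib
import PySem

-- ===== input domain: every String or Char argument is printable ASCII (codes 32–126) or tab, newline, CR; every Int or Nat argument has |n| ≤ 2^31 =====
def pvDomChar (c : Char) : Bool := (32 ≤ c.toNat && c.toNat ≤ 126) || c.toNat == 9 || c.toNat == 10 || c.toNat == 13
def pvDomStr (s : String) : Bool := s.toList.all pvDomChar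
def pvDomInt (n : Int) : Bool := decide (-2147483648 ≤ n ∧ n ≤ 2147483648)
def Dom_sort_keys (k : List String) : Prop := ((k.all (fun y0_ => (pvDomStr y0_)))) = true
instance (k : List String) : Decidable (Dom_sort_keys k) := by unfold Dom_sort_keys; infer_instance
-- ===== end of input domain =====

-- B replaces A's partition-into-three-lists / sort-each / concatenate by one stable sort keyed on (rank, value) (idiomatic; same cost).


-- ===== PORT A =====
def sort_keys (k : List String) : List String :=
  let ptb := k.foldl (fun s e =>
    if PySem.Str.startswith e "Programs" || PySem.Str.startswith e "Config" then
      (s.1 ++ [e], s.2.1, s.2.2)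
    else if PySem.Str.startswith e "DUNE" then
      (s.1, s.2.1 ++ [e], s.2.2)
    else
      (s.1, s.2.1, s.2.2 ++ [e])) (([] : List String), ([] : List String), ([] : List String))
  PySem.List.sorted ptb.1 (fun x => x) false ++
    PySem.List.sorted ptb.2.1 (fun x => x) false ++
    PySem.List.sorted ptb.2.2 (fun x => x) false

-- ===== PORT B =====
def pvRank (e : String) : Int :=
  if PySem.Str.startswith e "Programs" || PySem.Str.startswith e "Config" then 0
  else if PySem.Str.startswith e "DUNE" then 1
  else 2

def sort_keys_alt (k : List String) : List String :=
  PySem.List.sorted2 k pvRank (fun e => e) false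

-- ===== PRECONDITION & SPEC =====
def Spec_sort_keys (k : List String) (out : List String) : Prop := out = sort_keys_alt k
instance (k : List String) (out : List String) : Decidable (Spec_sort_keys k out) := by unfold Spec_sort_keys; infer_instance

-- ===== CLAIM (what is proved, stated in full; the proofs are below) =====
def Claim_equal_sort_keys : Prop := ∀ (k : List String), Dom_sort_keys k → Spec_sort_keys k (sort_keys k)

-- ===== LEMMAS AND PROOFS =====

-- the key B sorts by, as a single lexicographic key
def pvKey (e : String) : Lex (Int × String) := toLex (pvRank e, e)

lemma pvKey_inj : Function.Injective pvKey := by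
  intro a b h
  have := congrArg (fun x => (ofLex x).2) h
  simpa [pvKey] using this

-- B's tuple-key sort is the sort by the lexicographic key pvKey
lemma alt_eq_sorted_lex (k : List String) :
    sort_keys_alt k = PySem.List.sorted k pvKey false := by
  rw [PySem.List.sorted_eq_foldl_insertBy]
  show k.foldl (fun acc x => PySem.List.insertBy _ x acc) [] = _
  have hb : (fun a b => decide (pvRank a < pvRank b) ||
        (!decide (pvRank b < pvRank a) && decide ((fun e : String => e) a < (fun e : String => e) b)))
      = (fun a b => decide (pvKey a < pvKey b)) := by
    funext a b
    simp only [pvKey, Prod.Lex.toLex_lt_toLex]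
    rcases lt_trichotomy (pvRank a) (pvRank b) with h | h | h
    · simp [h, lt_asymm h]
    · simp [h]
    · simp [lt_asymm h, h, h.ne']
  rw [← hb]
  rfl

def pvC0 (e : String) : Bool := PySem.Str.startswith e "Programs" || PySem.Str.startswith e "Config"
def pvC1 (e : String) : Bool := PySem.Str.startswith e "DUNE"

-- A's partition loop builds the three filters
lemma foldl_partition (k : List String) (p t b : List String) :
    k.foldl (fun s e =>
      if pvC0 e then (s.1 ++ [e], s.2.1, s.2.2)
      else if pvC1 e then (s.1, s.2.1 ++ [e], s.2.2)
      else (s.1, s.2.1, s.2.2 ++ [e])) (p, t, b)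
    = (p ++ k.filter pvC0,
       t ++ k.filter (fun e => !pvC0 e && pvC1 e),
       b ++ k.filter (fun e => !pvC0 e && !pvC1 e)) := by
  induction k generalizing p t b with
  | nil => simp
  | cons x xs ih =>
    by_cases h0 : pvC0 x
    · simp [h0, ih]
    · by_cases h1 : pvC1 x
      · simp [h0, h1, ih]
      · simp [h0, h1, ih]

lemma rank_of_c0 {e : String} (h : pvC0 e = true) : pvRank e = 0 := by
  unfold pvC0 at h; unfold pvRank; rw [if_pos h]
lemma rank_of_c1 {e : String} (h0 : pvC0 e = false) (h1 : pvC1 e = true) : pvRank e = 1 := by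
  unfold pvC0 at h0; unfold pvC1 at h1; unfold pvRank
  rw [if_neg (by simp only [h0]; exact Bool.false_ne_true), if_pos h1]
lemma rank_of_c2 {e : String} (h0 : pvC0 e = false) (h1 : pvC1 e = false) : pvRank e = 2 := by
  unfold pvC0 at h0; unfold pvC1 at h1; unfold pvRank
  rw [if_neg (by simp only [h0]; exact Bool.false_ne_true),
    if_neg (by simp only [h1]; exact Bool.false_ne_true)]
-- pvKey-≤ between elements of different rank / same rank
lemma key_le_of_rank_lt {a b : String} (h : pvRank a < pvRank b) : pvKey a ≤ pvKey b := by
  simp only [pvKey, Prod.Lex.toLex_le_toLex]; exact Or.inl h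
lemma key_le_of_rank_eq {a b : String} (hr : pvRank a = pvRank b) (h : a ≤ b) :
    pvKey a ≤ pvKey b := by
  simp only [pvKey, Prod.Lex.toLex_le_toLex]; exact Or.inr ⟨hr, h⟩

-- a sorted-with-id block whose elements all have rank r is pvKey-pairwise
lemma pairwise_key_of_block (s : List String) (r : Int)
    (hr : ∀ x ∈ s, pvRank x = r) :
    (PySem.List.sorted s (fun x => x) false).Pairwise (fun a b => pvKey a ≤ pvKey b) := by
  have hp := PySem.List.sorted_pairwise s (fun x => x)
  refine hp.imp_of_mem ?_
  intro a b ha hb hab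
  have ha' := hr a ((PySem.List.mem_sorted _ _ _ _).1 ha)
  have hb' := hr b ((PySem.List.mem_sorted _ _ _ _).1 hb)
  exact key_le_of_rank_eq (ha'.trans hb'.symm) hab

theorem sort_keys_eq (k : List String) : sort_keys k = sort_keys_alt k := by
  rw [alt_eq_sorted_lex]
  have hA : sort_keys k =
      PySem.List.sorted (k.filter pvC0) (fun x => x) false ++
      PySem.List.sorted (k.filter (fun e => !pvC0 e && pvC1 e)) (fun x => x) false ++
      PySem.List.sorted (k.filter (fun e => !pvC0 e && !pvC1 e)) (fun x => x) false := by
    have h := foldl_partition k [] [] []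
    show PySem.List.sorted (k.foldl (fun s e =>
        if pvC0 e then (s.1 ++ [e], s.2.1, s.2.2)
        else if pvC1 e then (s.1, s.2.1 ++ [e], s.2.2)
        else (s.1, s.2.1, s.2.2 ++ [e]))
        (([] : List String), ([] : List String), ([] : List String))).1 (fun x => x) false ++
      PySem.List.sorted (k.foldl (fun s e =>
        if pvC0 e then (s.1 ++ [e], s.2.1, s.2.2)
        else if pvC1 e then (s.1, s.2.1 ++ [e], s.2.2)
        else (s.1, s.2.1, s.2.2 ++ [e]))
        (([] : List String), ([] : List String), ([] : List String))).2.1 (fun x => x) false ++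
      PySem.List.sorted (k.foldl (fun s e =>
        if pvC0 e then (s.1 ++ [e], s.2.1, s.2.2)
        else if pvC1 e then (s.1, s.2.1 ++ [e], s.2.2)
        else (s.1, s.2.1, s.2.2 ++ [e]))
        (([] : List String), ([] : List String), ([] : List String))).2.2 (fun x => x) false = _
    rw [h]
    simp only [List.nil_append]
  rw [hA]
  set s0 := PySem.List.sorted (k.filter pvC0) (fun x => x) false with hs0
  set s1 := PySem.List.sorted (k.filter (fun e => !pvC0 e && pvC1 e)) (fun x => x) false with hs1
  set s2 := PySem.List.sorted (k.filter (fun e => !pvC0 e && !pvC1 e)) (fun x => x) false with hs2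
  -- membership facts
  have f0 : ∀ x ∈ k.filter pvC0, pvRank x = 0 := fun x hx => rank_of_c0 (List.of_mem_filter hx)
  have f1 : ∀ x ∈ k.filter (fun e => !pvC0 e && pvC1 e), pvRank x = 1 := by
    intro x hx
    have h := List.of_mem_filter hx
    simp only [Bool.and_eq_true, Bool.not_eq_true'] at h
    exact rank_of_c1 h.1 h.2
  have f2 : ∀ x ∈ k.filter (fun e => !pvC0 e && !pvC1 e), pvRank x = 2 := by
    intro x hx
    have h := List.of_mem_filter hx
    simp only [Bool.and_eq_true, Bool.not_eq_true'] at h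
    exact rank_of_c2 h.1 h.2
  have m0 : ∀ x ∈ s0, pvRank x = 0 := fun x hx => f0 x ((PySem.List.mem_sorted _ _ _ _).1 (hs0 ▸ hx))
  have m1 : ∀ x ∈ s1, pvRank x = 1 := fun x hx => f1 x ((PySem.List.mem_sorted _ _ _ _).1 (hs1 ▸ hx))
  have m2 : ∀ x ∈ s2, pvRank x = 2 := fun x hx => f2 x ((PySem.List.mem_sorted _ _ _ _).1 (hs2 ▸ hx))
  -- permutation: s0 ++ s1 ++ s2 ~ k
  have hperm : (s0 ++ s1 ++ s2).Perm k := by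
    have p0 : s0.Perm (k.filter pvC0) := PySem.List.sorted_perm _ _ _
    have p1 : s1.Perm (k.filter (fun e => !pvC0 e && pvC1 e)) := PySem.List.sorted_perm _ _ _
    have p2 : s2.Perm (k.filter (fun e => !pvC0 e && !pvC1 e)) := PySem.List.sorted_perm _ _ _
    have hsplit : ((k.filter (fun e => !pvC0 e)).filter pvC1 ++
        (k.filter (fun e => !pvC0 e)).filter (fun e => !pvC1 e)).Perm
        (k.filter (fun e => !pvC0 e)) := List.filter_append_perm _ _
    have e1 : (k.filter (fun e => !pvC0 e)).filter pvC1 = k.filter (fun e => !pvC0 e && pvC1 e) := by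
      simp [List.filter_filter, Bool.and_comm]
    have e2 : (k.filter (fun e => !pvC0 e)).filter (fun e => !pvC1 e)
        = k.filter (fun e => !pvC0 e && !pvC1 e) := by
      simp [List.filter_filter, Bool.and_comm]
    rw [e1, e2] at hsplit
    have hA : (s0 ++ (s1 ++ s2)).Perm (k.filter pvC0 ++ k.filter (fun e => !pvC0 e)) :=
      p0.append ((p1.append p2).trans hsplit)
    have hB := hA.trans (List.filter_append_perm pvC0 k)
    simpa [List.append_assoc] using hB
  -- pairwise key-≤ on the concatenation
  have hpw : (s0 ++ s1 ++ s2).Pairwise (fun a b => pvKey a ≤ pvKey b) := by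
    rw [List.pairwise_append]
    refine ⟨?_, ?_, ?_⟩
    · rw [List.pairwise_append]
      refine ⟨pairwise_key_of_block _ 0 f0, pairwise_key_of_block _ 1 f1, ?_⟩
      intro a ha b hb
      exact key_le_of_rank_lt (by rw [m0 a ha, m1 b hb]; norm_num)
    · exact pairwise_key_of_block _ 2 f2
    · intro a ha b hb
      rcases List.mem_append.1 ha with h | h
      · exact key_le_of_rank_lt (by rw [m0 a h, m2 b hb]; norm_num)
      · exact key_le_of_rank_lt (by rw [m1 a h, m2 b hb]; norm_num)
  -- the sorted side is pairwise and a permutation of k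
  have hpw' : (PySem.List.sorted k pvKey false).Pairwise (fun a b => pvKey a ≤ pvKey b) :=
    PySem.List.sorted_pairwise k pvKey
  have hperm' : (s0 ++ s1 ++ s2).Perm (PySem.List.sorted k pvKey false) :=
    hperm.trans (PySem.List.sorted_perm k pvKey false).symm
  exact PySem.List.eq_of_perm_of_pairwise_le_of_injective pvKey pvKey_inj hperm' hpw hpw'

-- ===== VERDICT (by name: the statement is the Claim_ definition above) =====
theorem sort_keys_spec : Claim_equal_sort_keys := by
  intro k _
  unfold Spec_sort_keys
  exact sort_keys_eq k
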